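-- pv_equiv track=rewrite | github.com/DenBugNBA/YandexAlgorithmsTrainings | lectures/4_group_by_common_letters.py | key_by_word
-- ===== SOURCE A (Python) =====
-- def key_by_word(word):
--     letters = {}
--
--     for letter in word:
--         if letter not in letters:
--             letters[letter] = 0
--         letters[letter] += 1
--
--     letters_list = []
--
--     for letter in sorted(letters.keys()):
--         letters_list.append(letter)
--         letters_list.append(str(letters[letter]))
--
--     return "".join(letters_list)
-- ===== SOURCE B (Python) =====
-- def key_by_word(word):
--     def runs(chars):
--         if not chars:
--             return []
--         c = chars[0]
--         k = 1
--         while k < len(chars) and chars[k] == c: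
--             k += 1
--         return [(c, k)] + runs(chars[k:])
--
--     return "".join(c + str(n) for c, n in runs(sorted(word)))
-- ===== Notes on version B (the rewrite author's own statement) =====
-- stated objective: alternative
-- what changed: B sorts all characters first and groups consecutive equal runs of the sorted list, instead of A's count-into-dict pass followed by sorting the distinct keys.
import Mathlib
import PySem

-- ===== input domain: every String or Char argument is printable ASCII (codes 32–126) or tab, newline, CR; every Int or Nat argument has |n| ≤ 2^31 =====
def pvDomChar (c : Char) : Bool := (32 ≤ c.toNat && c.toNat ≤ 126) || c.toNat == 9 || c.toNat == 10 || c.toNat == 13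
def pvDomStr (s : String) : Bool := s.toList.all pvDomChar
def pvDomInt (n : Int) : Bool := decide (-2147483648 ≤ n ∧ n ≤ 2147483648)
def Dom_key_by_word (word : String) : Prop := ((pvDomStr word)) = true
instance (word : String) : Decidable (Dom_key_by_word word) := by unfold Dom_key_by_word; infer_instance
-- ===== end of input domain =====

-- B replaces A's count-into-dict-then-sort-keys pass by sort-all-characters-then-group-consecutive-runs (alternative decomposition, same cost class).

-- ===== PORT A =====
def key_by_word (word : String) : String :=
  let letters := word.toList.foldl (fun d letter =>
    let d := if d.contains letter then d else d.insert letter 0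
    d.insert letter (d.getD letter 0 + 1)) PySem.Dict.empty
  let lettersList := (PySem.List.sorted letters.keys (fun x => x) false).foldl
    (fun acc letter => acc ++ [String.ofList [letter], PySem.Int.toStr (letters.getD letter 0)]) []
  PySem.Str.join "" lettersList

-- ===== PORT B =====
-- runs: group the (sorted) character list into consecutive equal runs with their lengths
def pvRuns : List Char → List (Char × Nat)
  | [] => []
  | c :: rest =>
    let t := rest.takeWhile (· == c)
    (c, t.length + 1) :: pvRuns (rest.drop t.length)
termination_by l => l.length
decreasing_by
  simp only [List.length_drop, List.length_cons]
  omega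

def key_by_word_alt (word : String) : String :=
  PySem.Str.join ""
    ((pvRuns (PySem.List.sorted word.toList (fun x => x) false)).map
      (fun p => String.ofList (p.1 :: PySem.Int.toChars (p.2 : Int))))

-- ===== PRECONDITION & SPEC =====
def Spec_key_by_word (word : String) (out : String) : Prop := out = key_by_word_alt word
instance (word : String) (out : String) : Decidable (Spec_key_by_word word out) := by unfold Spec_key_by_word; infer_instance

-- ===== CLAIM (what is proved, stated in full; the proofs are below) =====
def Claim_equal_key_by_word : Prop := ∀ (word : String), Dom_key_by_word word → Spec_key_by_word word (key_by_word word)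

-- ===== LEMMAS AND PROOFS =====

-- join with empty separator is concatenation
lemma pv_join_nil (parts : List (List Char)) : PySem.Chars.join [] parts = parts.flatten := by
  induction parts with
  | nil => rfl
  | cons p ps ih =>
    cases ps with
    | nil => simp [PySem.Chars.join, List.intercalate]
    | cons q qs => rw [PySem.Chars.join_cons_cons]; simp_all

-- flatten distributes over flatMap
lemma pv_flatten_flatMap (ks : List Char) (f : Char → List (List Char)) :
    (ks.flatMap f).flatten = ks.flatMap (fun k => (f k).flatten) := by
  induction ks with
  | nil => simp
  | cons a t ih => simp [List.flatMap_cons, ih]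

-- ofList is a sublist (first occurrences in order)
lemma pv_ofList_sublist (l : List Char) : (PySem.Set.ofList l).Sublist l := by
  induction l with
  | nil => simp [PySem.Set.ofList]
  | cons x xs ih =>
    rw [PySem.Set.ofList_cons]
    exact List.Sublist.cons₂ x (List.Sublist.trans List.filter_sublist ih)

lemma pv_discard_of_not_mem (u : List Char) (c : Char) (hu : c ∉ u) :
    (PySem.Set.ofList u).discard c = PySem.Set.ofList u := by
  simp only [PySem.Set.discard]
  apply List.filter_eq_self.mpr
  intro a ha
  have ha' : a ∈ u := (PySem.Set.mem_ofList (y := a) (xs := u)).mp ha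
  have : (a == c) = false := beq_eq_false_iff_ne.mpr (fun h => hu (h ▸ ha'))
  simp [this]

-- the first-occurrence set of "c, then copies of c, then a c-free tail"
lemma pv_ofList_runs (c : Char) (t u : List Char) (ht : ∀ x ∈ t, x = c) (hu : c ∉ u) :
    PySem.Set.ofList (c :: (t ++ u)) = c :: PySem.Set.ofList u := by
  induction t with
  | nil =>
    rw [List.nil_append, PySem.Set.ofList_cons, pv_discard_of_not_mem u c hu]
  | cons x t' ih =>
    have hx : x = c := ht x (by simp)
    subst hx
    have ih' := ih (fun y hy => ht y (by simp [hy]))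
    rw [List.cons_append, PySem.Set.ofList_cons, ih']
    congr 1
    have h1 : PySem.Set.discard (x :: PySem.Set.ofList u) x
        = (PySem.Set.ofList u).discard x := by
      simp [PySem.Set.discard]
    rw [h1, pv_discard_of_not_mem u x hu]

-- no further copy of the head after the leading run of a sorted list
lemma pv_not_mem_dropWhile (c : Char) (rest : List Char)
    (hc : ∀ x ∈ rest, c ≤ x) (hp : rest.Pairwise (· ≤ ·)) :
    c ∉ rest.dropWhile (· == c) := by
  intro hmem
  have hsub : (rest.dropWhile (· == c)).Sublist rest := List.dropWhile_sublist _
  have hp' : (rest.dropWhile (· == c)).Pairwise (· ≤ ·) := hp.sublist hsub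
  cases hu : rest.dropWhile (· == c) with
  | nil => rw [hu] at hmem; exact absurd hmem (List.not_mem_nil)
  | cons h u' =>
    have hhead : ¬ ((h == c) = true) := by
      have := List.head?_dropWhile_not (p := (· == c)) (l := rest)
      rw [hu] at this
      simpa using this
    rw [hu] at hmem hp'
    rcases List.mem_cons.mp hmem with rfl | hmem'
    · exact hhead (by simp)
    · have h1 : h ≤ c := (List.pairwise_cons.mp hp').1 c hmem'
      have h2 : c ≤ h := hc h (hsub.subset (hu ▸ List.mem_cons_self))
      exact hhead (by simp [le_antisymm h1 h2])

-- the run decomposition of a sorted list is (sorted distinct keys, multiplicities)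
lemma pv_runs_spec : ∀ (n : Nat) (s : List Char), s.length ≤ n → s.Pairwise (· ≤ ·) →
    pvRuns s = (PySem.Set.ofList s).map (fun k => (k, s.count k)) := by
  intro n
  induction n with
  | zero =>
    intro s hlen _
    have : s = [] := List.eq_nil_of_length_eq_zero (Nat.le_zero.mp hlen)
    subst this; simp [pvRuns]
  | succ n ih =>
    intro s hlen hp
    cases s with
    | nil => simp [pvRuns]
    | cons c rest =>
      have hc : ∀ x ∈ rest, c ≤ x := (List.pairwise_cons.mp hp).1
      have hpr : rest.Pairwise (· ≤ ·) := (List.pairwise_cons.mp hp).2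
      set t := rest.takeWhile (· == c) with htdef
      set u := rest.dropWhile (· == c) with hudef
      have hrest : t ++ u = rest := List.takeWhile_append_dropWhile
      have hdrop : rest.drop t.length = u := by
        conv_lhs => rw [← hrest]
        exact List.drop_left
      have ht : ∀ x ∈ t, x = c := by
        intro x hx
        have := List.mem_takeWhile_imp hx
        simpa using this.symm
      have hu : c ∉ u := pv_not_mem_dropWhile c rest hc hpr
      have hulen : u.length ≤ n := by
        have h1 : u.Sublist rest := List.dropWhile_sublist _
        have := h1.length_le
        simp only [List.length_cons] at hlen
        omega
      have hpu : u.Pairwise (· ≤ ·) := hpr.sublist (List.dropWhile_sublist _)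
      have ihu := ih u hulen hpu
      have hscons : c :: rest = c :: (t ++ u) := by rw [hrest]
      rw [pvRuns]
      simp only [← htdef, hdrop]
      rw [hscons, pv_ofList_runs c t u ht hu]
      rw [List.map_cons]
      congr 1
      · congr 1
        rw [List.count_cons, List.count_append]
        have h1 : t.count c = t.length := List.count_eq_length.mpr (fun b hb => ((ht b hb) ▸ rfl))
        have h2 : u.count c = 0 := List.count_eq_zero.mpr hu
        simp [h1, h2]
      · rw [ihu]
        apply List.map_congr_left
        intro k hk
        have hku : k ∈ u := (PySem.Set.mem_ofList (y := k) (xs := u)).mp hk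
        have hkc : k ≠ c := fun h => hu (h ▸ hku)
        congr 1
        rw [List.count_cons, List.count_append]
        have h1 : t.count k = 0 := List.count_eq_zero.mpr (fun hkt => hkc (ht k hkt))
        simp [h1, Ne.symm hkc]

-- A's counting loop is Counter
lemma pv_dictA (cs : List Char) :
    cs.foldl (fun d letter =>
      let d := if d.contains letter then d else d.insert letter 0
      d.insert letter (d.getD letter 0 + 1)) PySem.Dict.empty = PySem.Dict.counter cs := by
  have hstep : (fun (d : PySem.Dict Char Int) letter =>
      let d := if d.contains letter then d else d.insert letter 0
      d.insert letter (d.getD letter 0 + 1))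
      = fun d x => d.insert x (d.getD x 0 + 1) := by
    funext d c
    by_cases h : d.contains c = true
    · simp [h]
    · have hf : d.contains c = false := by simpa using h
      simp only [hf, Bool.false_eq_true, if_false]
      rw [PySem.Dict.getD_insert_self, PySem.Dict.insert_insert_self,
        PySem.Dict.getD_of_not_contains d 0 hf]
  rw [hstep, PySem.Dict.foldl_insert_getD_add_one_eq_counter]

-- sorting the distinct keys equals first occurrences of the sorted characters
lemma pv_sorted_ofList (cs : List Char) :
    PySem.List.sorted (PySem.Set.ofList cs) (fun x => x) false
      = PySem.Set.ofList (PySem.List.sorted cs (fun x => x) false) := by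
  set s := PySem.List.sorted cs (fun x => x) false with hs
  apply PySem.List.sorted_eq_of_perm_of_pairwise_lt
  · apply (List.perm_ext_iff_of_nodup (PySem.Set.nodup_ofList s) (PySem.Set.nodup_ofList cs)).mpr
    intro a
    rw [PySem.Set.mem_ofList, PySem.Set.mem_ofList]
    exact (PySem.List.sorted_perm cs (fun x => x) false).mem_iff
  · have hle : (PySem.Set.ofList s).Pairwise (· ≤ ·) :=
      (PySem.List.sorted_pairwise cs (fun x => x)).sublist (pv_ofList_sublist s)
    have hne : (PySem.Set.ofList s).Pairwise (· ≠ ·) := PySem.Set.nodup_ofList s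
    exact (hle.and hne).imp (fun h => lt_of_le_of_ne h.1 h.2)

-- ===== VERDICT (by name: the statement is the Claim_ definition above) =====
theorem key_by_word_spec : Claim_equal_key_by_word := by
  intro word _
  unfold Spec_key_by_word key_by_word key_by_word_alt
  simp only [pv_dictA, PySem.Dict.keys_counter]
  set cs := word.toList with hcs
  set s := PySem.List.sorted cs (fun x => x) false with hs
  rw [pv_sorted_ofList cs]
  rw [PySem.List.foldl_append_eq_flatMap
    (g := fun letter => [String.ofList [letter],
      PySem.Int.toStr ((PySem.Dict.counter cs).getD letter 0)])]
  rw [List.nil_append]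
  rw [pv_runs_spec s.length s (le_refl _) (PySem.List.sorted_pairwise cs (fun x => x))]
  -- both sides are joins with empty separator: compare character lists
  apply String.toList_inj.mp
  rw [PySem.Str.toList_join, PySem.Str.toList_join]
  have hsep : ("" : String).toList = [] := rfl
  rw [hsep, pv_join_nil, pv_join_nil]
  rw [List.map_flatMap, List.map_map, List.map_map]
  rw [pv_flatten_flatMap]
  rw [← List.flatMap_def]
  apply List.flatMap_congr
  intro k _
  simp only [Function.comp, List.map_cons, List.map_nil, String.toList_ofList,
    PySem.Int.toList_toStr, List.flatten_cons, List.flatten_nil, List.append_nil,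
    PySem.Dict.getD_counter]
  rw [List.singleton_append]
  have hcount : List.count k s = List.count k cs :=
    (PySem.List.sorted_perm cs (fun x => x) false).count_eq k
  rw [hcount]
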